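-- pv_equiv track=rewrite | github.com/datawhalechina/huawei-od-python | codes/questions200/222_Number-without-101.py | solution
-- ===== SOURCE A (Python) =====
-- def solution(l, r):
--     count = 0
--     x = 0b0000_0000_0000_0000_0000_0000_0000_0111
--
--     for i in range(l, r + 1):
--         n = i
--         while n >= 5:
--             # 看是否有101(5)
--             if ((x & n) - 5) == 0:
--                 count += 1
--                 break
--             n >>= 1
--     return r - l + 1 - count
-- ===== SOURCE B (Python) =====
-- def _bad_upto(n):
--     """Count integers in [0, n] whose binary representation contains "101".
--
--     Digit DP over the bits of n (MSB first), tracking for numbers strictly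
--     below the processed prefix how many are in each alive state of the
--     KMP automaton for "101" (state = longest matched prefix; 3 = found).
--     """
--     if n < 0:
--         return 0
--     cnt0 = cnt1 = cnt2 = 0   # free numbers < prefix, by automaton state
--     state = 0                # automaton state of the tight prefix (3 = found)
--     for c in bin(n)[2:]:
--         b = c == '1'
--         n0, n1, n2 = cnt0 + cnt2, cnt0 + cnt1, cnt1
--         if b:
--             # the tight prefix extended by digit 0 becomes a free number
--             if state == 0:
--                 n0 += 1
--             elif state == 1:
--                 n2 += 1
--             elif state == 2:
--                 n0 += 1
--         cnt0, cnt1, cnt2 = n0, n1, n2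
--         if state == 0:
--             state = 1 if b else 0
--         elif state == 1:
--             state = 1 if b else 2
--         elif state == 2:
--             state = 3 if b else 0
--     good = cnt0 + cnt1 + cnt2 + (1 if state < 3 else 0)
--     return n + 1 - good
--
--
-- def solution(l, r):
--     if l > r:
--         return r - l + 1
--     bad = _bad_upto(r) - _bad_upto(max(l, 0) - 1)
--     return r - l + 1 - bad
-- ===== Notes on version B (the rewrite author's own statement) =====
-- stated objective: faster
-- what changed: A tests every integer in [l, r] individually with a bit-shifting inner loop; B counts integers without the binary pattern 101 by a digit DP over the bits (KMP automaton for '101'), evaluated at r and l-1 and differenced.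
import Mathlib
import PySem

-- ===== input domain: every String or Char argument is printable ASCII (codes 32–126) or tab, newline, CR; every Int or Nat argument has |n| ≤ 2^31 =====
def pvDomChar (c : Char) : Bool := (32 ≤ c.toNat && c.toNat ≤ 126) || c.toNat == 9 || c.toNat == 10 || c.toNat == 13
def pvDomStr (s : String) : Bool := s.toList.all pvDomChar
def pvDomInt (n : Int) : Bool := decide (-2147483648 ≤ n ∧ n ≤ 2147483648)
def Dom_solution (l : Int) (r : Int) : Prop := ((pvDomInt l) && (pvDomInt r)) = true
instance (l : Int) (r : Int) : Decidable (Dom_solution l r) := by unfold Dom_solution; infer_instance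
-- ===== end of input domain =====

-- B replaces A's per-number scan of [l, r] by a digit DP over the binary bits (objective: faster, asymptotic).

-- ===== PORT A =====
-- inner `while n >= 5` loop of A: returns true iff the loop hits `(x & n) - 5 == 0` (x = 7)
def pvWhileA (n : Int) : Bool :=
  if h : 5 ≤ n then
    if PySem.Int.band 7 n - 5 = 0 then true
    else pvWhileA (n >>> (1 : Nat))
  else false
termination_by n.toNat
decreasing_by
  rw [Int.shiftRight_eq_div_pow]
  omega

def solution (l : Int) (r : Int) : Int :=
  let count :=
    (PySem.List.pyRange l (r + 1) 1).foldl
      (fun c i => if pvWhileA i then c + 1 else c) 0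
  r - l + 1 - count

-- ===== PORT B =====
-- one step of B's digit DP: acc = ((cnt0, cnt1, cnt2), state), processes one bit b
def pvStepB (acc : (Int × Int × Int) × Int) (b : Bool) : (Int × Int × Int) × Int :=
  let cnt0 := acc.1.1
  let cnt1 := acc.1.2.1
  let cnt2 := acc.1.2.2
  let state := acc.2
  let n0 := cnt0 + cnt2
  let n1 := cnt0 + cnt1
  let n2 := cnt1
  let n0 := if b ∧ (state = 0 ∨ state = 2) then n0 + 1 else n0
  let n2 := if b ∧ state = 1 then n2 + 1 else n2
  let state' :=
    if state = 0 then (if b then 1 else 0)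
    else if state = 1 then (if b then 1 else 2)
    else if state = 2 then (if b then 3 else 0)
    else state
  ((n0, n1, n2), state')

-- digits of bin(n)[2:] for n ≥ 0, as booleans (b = (c == '1'))
def pvBits (n : Int) : List Bool :=
  if h : n < 2 then [decide (n = 1)]
  else pvBits (PySem.Int.floordiv n 2) ++ [decide (PySem.Int.mod n 2 = 1)]
termination_by n.toNat
decreasing_by
  rw [PySem.Int.floordiv_eq_ediv_of_pos (by omega)]
  omega

-- B's _bad_upto
def pvBadUpto (n : Int) : Int :=
  if n < 0 then 0
  else
    let res := (pvBits n).foldl pvStepB ((0, 0, 0), 0)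
    let good := res.1.1 + res.1.2.1 + res.1.2.2 + (if res.2 < 3 then 1 else 0)
    n + 1 - good

def solution_alt (l : Int) (r : Int) : Int :=
  if l > r then r - l + 1
  else r - l + 1 - (pvBadUpto r - pvBadUpto (max l 0 - 1))

-- ===== PRECONDITION & SPEC =====
def Spec_solution (l : Int) (r : Int) (out : Int) : Prop := out = solution_alt l r
instance (l : Int) (r : Int) (out : Int) : Decidable (Spec_solution l r out) := by unfold Spec_solution; infer_instance

-- ===== CLAIM (what is proved, stated in full; the proofs are below) =====
def Claim_equal_solution : Prop := ∀ (l : Int) (r : Int), Dom_solution l r → Spec_solution l r (solution l r)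

-- ===== LEMMAS AND PROOFS =====

-- the KMP automaton for the pattern "101": state = length of longest matched prefix, 3 = found (absorbing)
def pvDelta (s : Nat) (b : Bool) : Nat :=
  match s, b with
  | 0, false => 0
  | 0, true => 1
  | 1, false => 2
  | 1, true => 1
  | 2, false => 0
  | 2, true => 3
  | _, _ => 3

-- automaton state after reading the binary digits of v (MSB first)
def pvRS : Nat → Nat
  | 0 => 0
  | v + 1 => pvDelta (pvRS ((v + 1) / 2)) (decide ((v + 1) % 2 = 1))
decreasing_by exact Nat.div_lt_self (Nat.succ_pos v) (by omega)

-- "binary representation of v contains 101"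
def pvFound (v : Nat) : Prop := ∃ k, v / 2 ^ k % 8 = 5

-- number of v < P in automaton state s
def pvCnt (s P : Nat) : Nat := (List.range P).countP (fun v => decide (pvRS v = s))

-- number of bad (containing-101) integers in [0, x]
def pvDcnt (x : Int) : Nat := if x < 0 then 0 else pvCnt 3 (x.toNat + 1)

theorem pvDelta_le (s : Nat) (b : Bool) : pvDelta s b ≤ 3 := by
  unfold pvDelta; split <;> omega

theorem pvRS_le (v : Nat) : pvRS v ≤ 3 := by
  induction v using Nat.strong_induction_on with
  | _ v ih =>
    match v with
    | 0 => simp [pvRS]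
    | w + 1 =>
      rw [pvRS]
      exact pvDelta_le _ _

theorem pvRS_two_mul (v : Nat) : pvRS (2 * v) = pvDelta (pvRS v) false := by
  cases v with
  | zero => simp [pvRS, pvDelta]
  | succ w =>
    rw [show 2 * (w + 1) = (2 * w + 1) + 1 by ring, pvRS]
    have h2 : (2 * w + 1 + 1) / 2 = w + 1 := by omega
    have h3 : (2 * w + 1 + 1) % 2 = 0 := by omega
    rw [h2, h3]
    norm_num

theorem pvRS_two_mul_add_one (v : Nat) : pvRS (2 * v + 1) = pvDelta (pvRS v) true := by
  rw [show 2 * v + 1 = (2 * v) + 1 from rfl, pvRS]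
  have h2 : (2 * v + 1) / 2 = v := by omega
  have h3 : (2 * v + 1) % 2 = 1 := by omega
  rw [h2]
  simp [h3]

theorem pvFound_iff (v : Nat) : pvFound v ↔ v % 8 = 5 ∨ pvFound (v / 2) := by
  have hpow : ∀ k : Nat, v / 2 ^ (k + 1) = v / 2 / 2 ^ k := by
    intro k
    rw [Nat.div_div_eq_div_mul, ← Nat.pow_succ']
  constructor
  · rintro ⟨k, hk⟩
    cases k with
    | zero => left; simpa using hk
    | succ k => right; exact ⟨k, by rw [← hpow k]; exact hk⟩
  · rintro (h | ⟨k, hk⟩)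
    · exact ⟨0, by simpa using h⟩
    · exact ⟨k + 1, by rw [hpow k]; exact hk⟩

theorem pvFound_ge (v : Nat) : pvFound v → 5 ≤ v := by
  rintro ⟨k, hk⟩
  have h1 : v / 2 ^ k ≤ v := Nat.div_le_self _ _
  have h2 : v / 2 ^ k % 8 ≤ v / 2 ^ k := Nat.mod_le _ _
  omega

-- invariant characterising the automaton states by arithmetic on v
theorem pvRS_inv (v : Nat) :
    (pvRS v = 3 ↔ pvFound v) ∧ (pvRS v = 2 → v % 4 = 2) ∧ (v % 4 = 2 → pvRS v = 2 ∨ pvRS v = 3) ∧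
      (pvRS v = 1 → v % 2 = 1) ∧ (v % 2 = 1 → pvRS v = 1 ∨ pvRS v = 3) := by
  induction v using Nat.strong_induction_on with
  | _ v ih =>
    match v with
    | 0 =>
      refine ⟨⟨by simp [pvRS], fun hf => absurd (pvFound_ge 0 hf) (by omega)⟩, ?_, ?_, ?_, ?_⟩ <;>
        simp [pvRS]
    | w + 1 =>
      set u := w + 1 with hu
      obtain ⟨h3, h2a, h2b, h1a, h1b⟩ := ih (u / 2) (by omega)
      have hle := pvRS_le (u / 2)
      have hdm : 2 * (u / 2) + u % 2 = u := by omega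
      have hF : pvFound u ↔ u % 8 = 5 ∨ pvFound (u / 2) := pvFound_iff u
      have hrs : pvRS u = pvDelta (pvRS (u / 2)) (decide (u % 2 = 1)) := by
        rw [hu, pvRS]
      set s := pvRS (u / 2) with hs
      have hpar : u % 2 = 0 ∨ u % 2 = 1 := by omega
      interval_cases s <;> rcases hpar with hp | hp <;>
          simp [hp, pvDelta] at hrs <;>
          rw [hrs]
      -- s = 0, even
      · have hnf : ¬ pvFound u := by
          rw [hF]
          rintro (h8 | hq)
          · omega
          · exact absurd (h3.mpr hq) (by omega)
        refine ⟨⟨fun h => absurd h (by omega), fun hf => absurd hf hnf⟩,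
          fun h => absurd h (by omega), ?_, fun h => absurd h (by omega),
          fun h => absurd h (by omega)⟩
        intro h4
        have hq : u / 2 % 2 = 1 := by omega
        rcases h1b hq with h | h <;> omega
      -- s = 0, odd
      · have hnf : ¬ pvFound u := by
          rw [hF]
          rintro (h8 | hq)
          · have hq : u / 2 % 4 = 2 := by omega
            rcases h2b hq with h | h <;> omega
          · exact absurd (h3.mpr hq) (by omega)
        exact ⟨⟨fun h => absurd h (by omega), fun hf => absurd hf hnf⟩,
          fun h => absurd h (by omega), fun h => absurd h (by omega),
          fun _ => hp, fun _ => Or.inl rfl⟩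
      -- s = 1, even
      · have hq1 : u / 2 % 2 = 1 := h1a rfl
        have hnf : ¬ pvFound u := by
          rw [hF]
          rintro (h8 | hq)
          · omega
          · exact absurd (h3.mpr hq) (by omega)
        exact ⟨⟨fun h => absurd h (by omega), fun hf => absurd hf hnf⟩,
          fun _ => by omega, fun _ => Or.inl rfl,
          fun h => absurd h (by omega), fun h => absurd h (by omega)⟩
      -- s = 1, odd
      · have hq1 : u / 2 % 2 = 1 := h1a rfl
        have hnf : ¬ pvFound u := by
          rw [hF]
          rintro (h8 | hq)
          · omega
          · exact absurd (h3.mpr hq) (by omega)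
        exact ⟨⟨fun h => absurd h (by omega), fun hf => absurd hf hnf⟩,
          fun h => absurd h (by omega), fun h => absurd h (by omega),
          fun _ => hp, fun _ => Or.inl rfl⟩
      -- s = 2, even
      · have hq2 : u / 2 % 4 = 2 := h2a rfl
        have hnf : ¬ pvFound u := by
          rw [hF]
          rintro (h8 | hq)
          · omega
          · exact absurd (h3.mpr hq) (by omega)
        exact ⟨⟨fun h => absurd h (by omega), fun hf => absurd hf hnf⟩,
          fun h => absurd h (by omega), fun h => absurd h (by omega),
          fun h => absurd h (by omega), fun h => absurd h (by omega)⟩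
      -- s = 2, odd
      · have hq2 : u / 2 % 4 = 2 := h2a rfl
        have hf : pvFound u := hF.mpr (Or.inl (by omega))
        exact ⟨⟨fun _ => hf, fun _ => rfl⟩, fun h => absurd h (by omega),
          fun _ => Or.inr rfl, fun h => absurd h (by omega), fun _ => Or.inr rfl⟩
      -- s = 3, even
      · have hf : pvFound u := hF.mpr (Or.inr (h3.mp rfl))
        exact ⟨⟨fun _ => hf, fun _ => rfl⟩, fun h => absurd h (by omega),
          fun _ => Or.inr rfl, fun h => absurd h (by omega), fun _ => Or.inr rfl⟩
      -- s = 3, odd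
      · have hf : pvFound u := hF.mpr (Or.inr (h3.mp rfl))
        exact ⟨⟨fun _ => hf, fun _ => rfl⟩, fun h => absurd h (by omega),
          fun _ => Or.inr rfl, fun h => absurd h (by omega), fun _ => Or.inr rfl⟩

theorem pvWhileA_found (v : Nat) : pvWhileA (v : Int) = true ↔ pvFound v := by
  induction v using Nat.strong_induction_on with
  | _ v ih =>
    by_cases h5 : 5 ≤ v
    · rw [pvWhileA, dif_pos (by exact_mod_cast h5)]
      have hband : PySem.Int.band 7 (v : Int) = ((v % 8 : Nat) : Int) := by
        have h := PySem.Int.band_natCast 7 v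
        norm_num at h
        rw [h]
        congr 1
        rw [Nat.and_comm]
        simpa using Nat.and_two_pow_sub_one_eq_mod v 3
      have hsh : ((v : Int) >>> (1 : Nat)) = ((v / 2 : Nat) : Int) := by rfl
      by_cases h8 : v % 8 = 5
      · rw [if_pos (by rw [hband, h8]; norm_num)]
        simp only [true_iff]
        exact ⟨0, by simpa using h8⟩
      · rw [if_neg (by rw [hband]; omega), hsh, ih (v / 2) (by omega), pvFound_iff v]
        constructor
        · exact Or.inr
        · rintro (h | h)
          · exact absurd h h8
          · exact h
    · rw [pvWhileA, dif_neg (by exact_mod_cast h5)]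
      exact ⟨fun hc => absurd hc (by simp), fun hf => absurd (pvFound_ge v hf) h5⟩

theorem pvWhileA_nat (v : Nat) : pvWhileA (v : Int) = decide (pvRS v = 3) := by
  have h2 := (pvRS_inv v).1
  by_cases hf : pvRS v = 3
  · simp only [hf, decide_true]
    exact (pvWhileA_found v).mpr (h2.mp hf)
  · simp only [hf, decide_false]
    rw [← Bool.not_eq_true, pvWhileA_found]
    exact fun hfound => hf (h2.mpr hfound)

theorem pvWhileA_neg (n : Int) (h : n < 0) : pvWhileA n = false := by
  rw [pvWhileA, dif_neg (by omega)]

theorem pvCountP_two_mul (P : Nat) (q : Nat → Bool) :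
    (List.range (2 * P)).countP q =
      (List.range P).countP (fun v => q (2 * v)) + (List.range P).countP (fun v => q (2 * v + 1)) := by
  induction P with
  | zero => simp
  | succ P ih =>
    rw [show 2 * (P + 1) = (2 * P + 1) + 1 by ring]
    rw [List.range_succ, List.range_succ, List.range_succ, List.countP_append,
      List.countP_append, List.countP_append, List.countP_append, ih]
    simp only [List.countP_cons, List.countP_nil]
    cases hq1 : q (2 * P) <;> cases hq2 : q (2 * P + 1) <;> simp [hq1, hq2] <;> omega

theorem pvCountP_or (l : List Nat) (a b : Nat) (hab : a ≠ b) :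
    l.countP (fun v => decide (pvRS v = a ∨ pvRS v = b)) =
      l.countP (fun v => decide (pvRS v = a)) + l.countP (fun v => decide (pvRS v = b)) := by
  induction l with
  | nil => simp
  | cons x t ih =>
    simp only [List.countP_cons, ih]
    by_cases hxa : pvRS x = a <;> by_cases hxb : pvRS x = b <;> simp_all <;> omega

theorem pvCnt_succ (s P : Nat) : pvCnt s (P + 1) = pvCnt s P + (if pvRS P = s then 1 else 0) := by
  unfold pvCnt
  rw [List.range_succ, List.countP_append]
  simp [List.countP_cons]

theorem pvCnt0_double (P : Nat) : pvCnt 0 (2 * P) = pvCnt 0 P + pvCnt 2 P := by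
  unfold pvCnt
  rw [pvCountP_two_mul]
  have e1 : (fun v => decide (pvRS (2 * v) = 0)) = fun v => decide (pvRS v = 0 ∨ pvRS v = 2) := by
    funext v
    have hle := pvRS_le v
    rw [pvRS_two_mul]
    set s := pvRS v with hs
    interval_cases s <;> simp [pvDelta]
  have e2 : (fun v => decide (pvRS (2 * v + 1) = 0)) = fun _ => false := by
    funext v
    have hle := pvRS_le v
    rw [pvRS_two_mul_add_one]
    set s := pvRS v with hs
    interval_cases s <;> simp [pvDelta]
  rw [e1, e2, pvCountP_or _ 0 2 (by omega)]
  simp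

theorem pvCnt1_double (P : Nat) : pvCnt 1 (2 * P) = pvCnt 0 P + pvCnt 1 P := by
  unfold pvCnt
  rw [pvCountP_two_mul]
  have e1 : (fun v => decide (pvRS (2 * v) = 1)) = fun _ => false := by
    funext v
    have hle := pvRS_le v
    rw [pvRS_two_mul]
    set s := pvRS v with hs
    interval_cases s <;> simp [pvDelta]
  have e2 : (fun v => decide (pvRS (2 * v + 1) = 1)) = fun v => decide (pvRS v = 0 ∨ pvRS v = 1) := by
    funext v
    have hle := pvRS_le v
    rw [pvRS_two_mul_add_one]
    set s := pvRS v with hs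
    interval_cases s <;> simp [pvDelta]
  rw [e1, e2, pvCountP_or _ 0 1 (by omega)]
  simp

theorem pvCnt2_double (P : Nat) : pvCnt 2 (2 * P) = pvCnt 1 P := by
  unfold pvCnt
  rw [pvCountP_two_mul]
  have e1 : (fun v => decide (pvRS (2 * v) = 2)) = fun v => decide (pvRS v = 1) := by
    funext v
    have hle := pvRS_le v
    rw [pvRS_two_mul]
    set s := pvRS v with hs
    interval_cases s <;> simp [pvDelta]
  have e2 : (fun v => decide (pvRS (2 * v + 1) = 2)) = fun _ => false := by
    funext v
    have hle := pvRS_le v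
    rw [pvRS_two_mul_add_one]
    set s := pvRS v with hs
    interval_cases s <;> simp [pvDelta]
  rw [e1, e2]
  simp

theorem pvStepB_spec (P : Nat) (b : Bool) :
    pvStepB (((pvCnt 0 P : Int), (pvCnt 1 P : Int), (pvCnt 2 P : Int)), (pvRS P : Int)) b =
      (((pvCnt 0 (2 * P + b.toNat) : Int), (pvCnt 1 (2 * P + b.toNat) : Int), (pvCnt 2 (2 * P + b.toNat) : Int)),
        (pvRS (2 * P + b.toNat) : Int)) := by
  have hle := pvRS_le P
  have h20 := pvRS_two_mul P
  have h21 := pvRS_two_mul_add_one P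
  have c0 := pvCnt0_double P
  have c1 := pvCnt1_double P
  have c2 := pvCnt2_double P
  have s0 := pvCnt_succ 0 (2 * P)
  have s1 := pvCnt_succ 1 (2 * P)
  have s2 := pvCnt_succ 2 (2 * P)
  have hcase : pvRS P = 0 ∨ pvRS P = 1 ∨ pvRS P = 2 ∨ pvRS P = 3 := by omega
  rcases hcase with h | h | h | h <;>
    rw [h] at h20 h21 <;>
    simp [pvDelta] at h20 h21 <;>
    rw [h20] at s0 s1 s2 <;>
    norm_num at s0 s1 s2 <;>
    cases b <;>
    simp [pvStepB, h, Prod.ext_iff] <;>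
    omega

theorem pvFold_spec (v : Nat) :
    (pvBits (v : Int)).foldl pvStepB ((0, 0, 0), 0) =
      (((pvCnt 0 v : Int), (pvCnt 1 v : Int), (pvCnt 2 v : Int)), (pvRS v : Int)) := by
  induction v using Nat.strong_induction_on with
  | _ v ih =>
    have hinit : (((0 : Int), (0 : Int), (0 : Int)), (0 : Int)) =
        (((pvCnt 0 0 : Int), (pvCnt 1 0 : Int), (pvCnt 2 0 : Int)), (pvRS 0 : Int)) := by
      simp [pvCnt, pvRS]
    match v with
    | 0 =>
      have hb : pvBits ((0 : Nat) : Int) = [false] := by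
        rw [pvBits]
        norm_num
      rw [hb]
      simp only [List.foldl_cons, List.foldl_nil, hinit]
      exact pvStepB_spec 0 false
    | 1 =>
      have hb : pvBits ((1 : Nat) : Int) = [true] := by
        rw [pvBits]
        norm_num
      rw [hb]
      simp only [List.foldl_cons, List.foldl_nil, hinit]
      have := pvStepB_spec 0 true
      simpa using this
    | (w + 2) =>
      set v := w + 2 with hv
      have hfd : PySem.Int.floordiv ((v : Nat) : Int) 2 = ((v / 2 : Nat) : Int) := by
        norm_num
      have hmod : PySem.Int.mod ((v : Nat) : Int) 2 = ((v % 2 : Nat) : Int) := by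
        norm_num
      have hdec : decide (((v % 2 : Nat) : Int) = 1) = decide (v % 2 = 1) :=
        decide_eq_decide.mpr (by exact_mod_cast Iff.rfl)
      have hb : pvBits (v : Int) =
          pvBits ((v / 2 : Nat) : Int) ++ [decide (v % 2 = 1)] := by
        rw [pvBits, dif_neg (by exact_mod_cast (by omega : ¬ ((v : Int) < 2)))]
        rw [hfd, hmod, hdec]
      rw [hb, List.foldl_append]
      rw [ih (v / 2) (by omega)]
      have hstep := pvStepB_spec (v / 2) (decide (v % 2 = 1))
      rcases Nat.mod_two_eq_zero_or_one v with hp | hp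
      · have hbn : decide (v % 2 = 1) = false := by simp [hp]
        rw [hbn] at hstep ⊢
        simp only [Bool.toNat_false] at hstep
        simp only [List.foldl_cons, List.foldl_nil]
        rw [hstep]
        have hvv : 2 * (v / 2) + 0 = v := by omega
        rw [hvv]
      · have hbn : decide (v % 2 = 1) = true := by simp [hp]
        rw [hbn] at hstep ⊢
        simp only [Bool.toNat_true] at hstep
        simp only [List.foldl_cons, List.foldl_nil]
        rw [hstep]
        have hvv : 2 * (v / 2) + 1 = v := by omega
        rw [hvv]

theorem pvCnt_sum (P : Nat) : pvCnt 0 P + pvCnt 1 P + pvCnt 2 P + pvCnt 3 P = P := by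
  induction P with
  | zero => simp [pvCnt]
  | succ P ih =>
    have hle := pvRS_le P
    rw [pvCnt_succ, pvCnt_succ, pvCnt_succ, pvCnt_succ]
    split_ifs <;> omega

theorem pvBadUpto_eq (x : Int) : pvBadUpto x = (pvDcnt x : Int) := by
  by_cases hx : x < 0
  · simp [pvBadUpto, pvDcnt, hx]
  · rw [pvBadUpto, if_neg hx]
    unfold pvDcnt
    rw [if_neg hx]
    have hxv : x = ((x.toNat : Nat) : Int) := by omega
    set v := x.toNat with hv
    rw [hxv, pvFold_spec v]
    have hle := pvRS_le v
    have hsum := pvCnt_sum v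
    have h0 := pvCnt_succ 0 v
    have h1 := pvCnt_succ 1 v
    have h2 := pvCnt_succ 2 v
    have h3 := pvCnt_succ 3 v
    simp only []
    split_ifs at * <;> push_cast <;> omega

theorem pvDcnt_succ (x : Int) :
    (pvDcnt x : Int) = pvDcnt (x - 1) + (if pvWhileA x then 1 else 0) := by
  by_cases hx : x < 0
  · rw [pvWhileA_neg x (by omega)]
    simp [pvDcnt, hx, show x - 1 < 0 by omega]
  · have hxv : x = ((x.toNat : Nat) : Int) := by omega
    have hw : pvWhileA x = decide (pvRS x.toNat = 3) := by
      rw [hxv]; exact pvWhileA_nat x.toNat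
    have hsucc := pvCnt_succ 3 x.toNat
    unfold pvDcnt
    by_cases h0 : x = 0
    · subst h0
      rw [if_neg (by omega), if_pos (by omega), hw]
      have hrs0 : pvRS 0 = 0 := by rw [pvRS]
      simp [pvCnt, List.range_succ, List.countP_cons, hrs0]
    · have hx1 : ¬ (x - 1 < 0) := by omega
      rw [if_neg hx, if_neg hx1, hw]
      have ht : (x - 1).toNat + 1 = x.toNat := by omega
      rw [ht, hsucc]
      simp only [decide_eq_true_eq]
      split_ifs <;> push_cast <;> omega

theorem pvRange_empty (a b : Int) (h : b ≤ a) : PySem.List.pyRange a b 1 = [] := by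
  simp only [PySem.List.pyRange]
  rw [if_neg (by norm_num)]
  norm_num
  intro h2
  omega

theorem pvCountA (l r : Int) (h : l ≤ r + 1) :
    ((PySem.List.pyRange l (r + 1) 1).foldl (fun c i => if pvWhileA i then c + 1 else c) 0 : Int) =
      (pvDcnt r : Int) - pvDcnt (l - 1) := by
  have aux : ∀ n : Nat, ∀ r : Int, l ≤ r + 1 → (r + 1 - l).toNat = n →
      ((PySem.List.pyRange l (r + 1) 1).foldl (fun c i => if pvWhileA i then c + 1 else c) 0 : Int) =
        (pvDcnt r : Int) - pvDcnt (l - 1) := by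
    intro n
    induction n with
    | zero =>
      intro r hlr hn
      have : r + 1 = l := by omega
      rw [this, pvRange_empty l l (by omega)]
      have : r = l - 1 := by omega
      rw [this]
      simp
    | succ n ihn =>
      intro r hlr hn
      have hlr2 : l ≤ r := by omega
      rw [PySem.List.pyRange_one_succ_right hlr2, List.foldl_append]
      have ih := ihn (r - 1) (by omega) (by omega)
      rw [show r - 1 + 1 = r by omega] at ih
      rw [ih]
      have hd := pvDcnt_succ r
      simp only [List.foldl_cons, List.foldl_nil]
      split_ifs at * <;> omega
  exact aux (r + 1 - l).toNat r h rfl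

-- ===== VERDICT (by name: the statement is the Claim_ definition above) =====
theorem solution_spec : Claim_equal_solution := by
  intro l r _
  unfold Spec_solution solution solution_alt
  by_cases hlr : l > r
  · have he : PySem.List.pyRange l (r + 1) 1 = [] := by
      simp only [PySem.List.pyRange]
      simp only [if_neg (by norm_num : ¬ (1:Int) = 0)]
      norm_num
      intro h; omega
    rw [he]
    simp [hlr]
  · rw [Int.not_lt] at hlr
    rw [pvCountA l r (by omega)]
    have hmax : pvDcnt (max l 0 - 1) = pvDcnt (l - 1) := by
      unfold pvDcnt
      rcases le_or_gt l 0 with h | h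
      · rw [if_pos (by omega), if_pos (by omega)]
      · rw [max_eq_left (by omega)]
    rw [if_neg (by omega), pvBadUpto_eq, pvBadUpto_eq, hmax]
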